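-- pv_equiv track=rewrite | github.com/LoH-lu/Device-Type-Library-Import-Script | master_cleanup.py | should_remove_file
-- ===== SOURCE A (Python) =====
-- LICENSE_PATTERNS = {"license", "license.txt", "license.md", "license.rst"}
--
-- README_PREFIXES = {"readme", "readme.md", "readme.txt", "readme.rst"}
--
-- REQUIREMENTS_FILENAMES = {"requirements.txt"}
--
-- CONTRIBUTING_FILENAMES = {"contributing", "contributing.md", "contributing.txt"}
--
-- def should_remove_file(name: str) -> bool:
--     """Decide whether a filename matches removal patterns."""
--     lower_name = name.lower()
--     if lower_name.startswith("."):
--         return True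
--     if lower_name in LICENSE_PATTERNS:
--         return True
--     if lower_name in REQUIREMENTS_FILENAMES:
--         return True
--     if lower_name in CONTRIBUTING_FILENAMES:
--         return True
--     # remove filenames that start with readme (covers README, README.md, etc.)
--     for prefix in README_PREFIXES:
--         if lower_name == prefix or lower_name.startswith(prefix + "."):
--             return True
--     return False
-- ===== SOURCE B (Python) =====
-- def should_remove_file(name: str) -> bool:
--     """Decide whether a filename matches removal patterns.
--
--     Split once at the first dot and decide from a (stem, extension) table
--     instead of set memberships plus a prefix loop.
--     """
--     stem, sep, ext = name.lower().partition(".")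
--     if sep and not stem:          # hidden file: leading dot (or just ".")
--         return True
--     if stem == "readme":          # readme, readme.<anything>
--         return True
--     if stem == "license":
--         return not sep or ext in ("txt", "md", "rst")
--     if stem == "requirements":
--         return ext == "txt"
--     if stem == "contributing":
--         return not sep or ext in ("md", "txt")
--     return False
-- ===== Notes on version B (the rewrite author's own statement) =====
-- stated objective: simpler
-- what changed: Instead of A's four set-membership tests plus an explicit readme-prefix loop, B partitions the lowercased name once at the first dot and decides from a (stem, extension) table.
import Mathlib
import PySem

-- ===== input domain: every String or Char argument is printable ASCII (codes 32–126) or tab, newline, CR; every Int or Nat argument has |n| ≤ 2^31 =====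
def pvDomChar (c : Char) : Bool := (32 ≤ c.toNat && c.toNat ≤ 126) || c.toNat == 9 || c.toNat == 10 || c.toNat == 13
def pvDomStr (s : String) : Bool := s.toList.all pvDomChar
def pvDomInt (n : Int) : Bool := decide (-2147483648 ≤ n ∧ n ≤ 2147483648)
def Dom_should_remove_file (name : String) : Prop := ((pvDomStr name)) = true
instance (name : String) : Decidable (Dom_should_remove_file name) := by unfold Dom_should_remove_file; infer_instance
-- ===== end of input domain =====

-- B replaces A's set memberships plus readme-prefix loop by a single split at the
-- first dot and a (stem, extension) table — simpler, one decision structure.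

-- ===== PORT A =====
-- literal port of Source A: lowercase, leading-dot check, three set memberships, then the
-- readme-prefix loop (early return = List.any; p + "." built by list append, exact).
def should_remove_file (name : String) : Bool :=
  let lower_name := PySem.Str.lower name
  if PySem.Str.startswith lower_name "." then true
  else if ["license", "license.txt", "license.md", "license.rst"].contains lower_name then true
  else if ["requirements.txt"].contains lower_name then true
  else if ["contributing", "contributing.md", "contributing.txt"].contains lower_name then true
  else if ["readme", "readme.md", "readme.txt", "readme.rst"].any (fun p =>
      lower_name == p || PySem.Str.startswith lower_name (String.ofList (p.toList ++ ['.']))) then true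
  else false

-- ===== PORT B =====
-- port of Source B; str.partition('.') is ported by hand as takeWhile/dropWhile at the
-- first '.' (exact: stem = part before the first dot, rest = separator ++ ext).
def should_remove_file_alt (name : String) : Bool :=
  let l := (PySem.Str.lower name).toList
  let stem := l.takeWhile (fun c => c ≠ '.')
  let rest := l.dropWhile (fun c => c ≠ '.')
  let ext := rest.drop 1
  if !rest.isEmpty && stem.isEmpty then true
  else if stem = "readme".toList then true
  else if stem = "license".toList then rest.isEmpty || (["txt", "md", "rst"].map String.toList).contains ext
  else if stem = "requirements".toList then decide (ext = "txt".toList)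
  else if stem = "contributing".toList then rest.isEmpty || (["md", "txt"].map String.toList).contains ext
  else false

-- ===== PRECONDITION & SPEC =====
def Spec_should_remove_file (name : String) (out : Bool) : Prop := out = should_remove_file_alt name
instance (name : String) (out : Bool) : Decidable (Spec_should_remove_file name out) := by unfold Spec_should_remove_file; infer_instance

-- ===== CLAIM (what is proved, stated in full; the proofs are below) =====
def Claim_equal_should_remove_file : Prop := ∀ (name : String), Dom_should_remove_file name → Spec_should_remove_file name (should_remove_file name)

-- ===== LEMMAS AND PROOFS =====

-- characterisations of "l equals / is prefixed by a dotted pattern" via the split at the first '.'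
theorem pv_split_eq_nodot {s l : List Char} (hs : '.' ∉ s) :
    l = s ↔ l.takeWhile (fun c => c ≠ '.') = s ∧ l.dropWhile (fun c => c ≠ '.') = [] := by
  constructor
  · intro he
    have h : ∀ c ∈ s, (fun c => decide (c ≠ '.')) c = true := by
      intro c hc; simp; rintro rfl; exact hs hc
    subst he
    exact ⟨List.takeWhile_eq_self_iff.mpr h, List.dropWhile_eq_nil_iff.mpr h⟩
  · rintro ⟨h1, h2⟩
    have h3 := List.takeWhile_append_dropWhile (p := fun c => decide (c ≠ '.')) (l := l)
    rw [h1, h2] at h3; simpa using h3.symm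

theorem pv_split_eq_dot {s t l : List Char} (hs : '.' ∉ s) :
    l = s ++ '.' :: t ↔ l.takeWhile (fun c => c ≠ '.') = s ∧ l.dropWhile (fun c => c ≠ '.') = '.' :: t := by
  constructor
  · intro he
    have h : ∀ c ∈ s, (fun c => decide (c ≠ '.')) c = true := by
      intro c hc; simp; rintro rfl; exact hs hc
    subst he
    constructor
    · rw [List.takeWhile_append_of_pos h]; simp [List.takeWhile]
    · rw [List.dropWhile_append_of_pos h]; simp [List.dropWhile]
  · rintro ⟨h1, h2⟩
    have h3 := List.takeWhile_append_dropWhile (p := fun c => decide (c ≠ '.')) (l := l)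
    rw [h1, h2] at h3; exact h3.symm

theorem pv_rest_head {l : List Char} (h : l.dropWhile (fun c => c ≠ '.') ≠ []) :
    l.dropWhile (fun c => c ≠ '.') = '.' :: (l.dropWhile (fun c => c ≠ '.')).drop 1 := by
  rcases hr : l.dropWhile (fun c => c ≠ '.') with _ | ⟨c, t⟩
  · exact absurd hr h
  · have h5 := List.head?_dropWhile_not (p := fun c => decide (c ≠ '.')) (l := l)
    rw [hr] at h5
    simp at h5
    simp [h5]

theorem pv_split_prefix {s l : List Char} (hs : '.' ∉ s) :
    (s ++ ['.']) <+: l ↔ l.takeWhile (fun c => c ≠ '.') = s ∧ l.dropWhile (fun c => c ≠ '.') ≠ [] := by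
  constructor
  · rintro ⟨t, ht⟩
    have h0 : l = s ++ '.' :: t := by simpa using ht.symm
    rw [((pv_split_eq_dot hs).mp h0).1, ((pv_split_eq_dot hs).mp h0).2]
    simp
  · rintro ⟨h1, h2⟩
    refine ⟨(l.dropWhile (fun c => c ≠ '.')).drop 1, ?_⟩
    have h3 := (pv_split_eq_dot (t := (l.dropWhile (fun c => c ≠ '.')).drop 1) hs).mpr
      ⟨h1, pv_rest_head h2⟩
    simpa using h3.symm

theorem pv_main (name : String) : should_remove_file name = should_remove_file_alt name := by
  unfold should_remove_file should_remove_file_alt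
  simp only [PySem.Str.startswith_eq, List.contains_eq_mem, List.mem_cons, List.any_cons,
    List.any_nil, String.toList_ofList, decide_eq_true_eq, List.not_mem_nil, or_false,
    Bool.or_eq_true, beq_iff_eq, ← String.toList_inj, PySem.Str.toList_lower]
  set L := PySem.Chars.lower name.toList with hL
  clear_value L
  set S := L.takeWhile (fun c => c ≠ '.') with hS
  set R := L.dropWhile (fun c => c ≠ '.') with hR
  have hSdot : '.' ∉ S := fun h => by
    have := List.mem_takeWhile_imp (hS ▸ h); simp at this
  have hRsh : R ≠ [] → R = '.' :: R.drop 1 := fun h => hR ▸ pv_rest_head (hR ▸ h)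
  have e0 : PySem.Chars.startswith L ".".toList = true ↔ S = [] ∧ R ≠ [] := by
    rw [PySem.Chars.startswith_iff]
    exact pv_split_prefix (s := []) (by simp)
  have eN : ∀ s : List Char, '.' ∉ s → (L = s ↔ S = s ∧ R = []) := fun s h => pv_split_eq_nodot h
  have eD : ∀ s t : List Char, '.' ∉ s → (L = s ++ '.' :: t ↔ S = s ∧ R = '.' :: t) :=
    fun s t h => pv_split_eq_dot h
  have eP : ∀ s : List Char, '.' ∉ s →
      (PySem.Chars.startswith L (s ++ ['.']) = true ↔ S = s ∧ R ≠ []) := fun s h => by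
    rw [PySem.Chars.startswith_iff]; exact pv_split_prefix h
  -- the two dotted readme prefixes in A's loop are subsumed by "readme." <+: L
  have ePP : ∀ s t : List Char, '.' ∉ s →
      (PySem.Chars.startswith L ((s ++ '.' :: t) ++ ['.']) = true → S = s ∧ R ≠ []) := by
    intro s t h hp
    rw [PySem.Chars.startswith_iff] at hp
    refine (pv_split_prefix h).mp (List.IsPrefix.trans ?_ hp)
    exact ⟨t ++ ['.'], by simp⟩
  have q1 : L = "license".toList ↔ S = "license".toList ∧ R = [] := eN _ (by decide)
  have q2 : L = "contributing".toList ↔ S = "contributing".toList ∧ R = [] := eN _ (by decide)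
  have r1 : L = "license.txt".toList ↔ S = "license".toList ∧ R = '.' :: "txt".toList := by
    rw [show ("license.txt" : String).toList = "license".toList ++ '.' :: "txt".toList from rfl]
    exact eD _ _ (by decide)
  have r2 : L = "license.md".toList ↔ S = "license".toList ∧ R = '.' :: "md".toList := by
    rw [show ("license.md" : String).toList = "license".toList ++ '.' :: "md".toList from rfl]
    exact eD _ _ (by decide)
  have r3 : L = "license.rst".toList ↔ S = "license".toList ∧ R = '.' :: "rst".toList := by
    rw [show ("license.rst" : String).toList = "license".toList ++ '.' :: "rst".toList from rfl]
    exact eD _ _ (by decide)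
  have r4 : L = "requirements.txt".toList ↔ S = "requirements".toList ∧ R = '.' :: "txt".toList := by
    rw [show ("requirements.txt" : String).toList = "requirements".toList ++ '.' :: "txt".toList from rfl]
    exact eD _ _ (by decide)
  have r5 : L = "contributing.md".toList ↔ S = "contributing".toList ∧ R = '.' :: "md".toList := by
    rw [show ("contributing.md" : String).toList = "contributing".toList ++ '.' :: "md".toList from rfl]
    exact eD _ _ (by decide)
  have r6 : L = "contributing.txt".toList ↔ S = "contributing".toList ∧ R = '.' :: "txt".toList := by
    rw [show ("contributing.txt" : String).toList = "contributing".toList ++ '.' :: "txt".toList from rfl]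
    exact eD _ _ (by decide)
  have eReadme :
      ((L = "readme".toList ∨ PySem.Chars.startswith L ("readme".toList ++ ['.']) = true) ∨
        (L = "readme.md".toList ∨ PySem.Chars.startswith L ("readme.md".toList ++ ['.']) = true) ∨
          (L = "readme.txt".toList ∨ PySem.Chars.startswith L ("readme.txt".toList ++ ['.']) = true) ∨
            (L = "readme.rst".toList ∨ PySem.Chars.startswith L ("readme.rst".toList ++ ['.']) = true) ∨
              false = true) ↔ S = "readme".toList := by
    constructor
    · rintro (⟨h | h⟩ | ⟨h | h⟩ | ⟨h | h⟩ | ⟨h | h⟩ | h)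
      · exact ((eN _ (by decide)).mp h).1
      · exact ((eP _ (by decide)).mp h).1
      · exact ((eD "readme".toList "md".toList (by decide)).mp h).1
      · exact (ePP "readme".toList "md".toList (by decide) h).1
      · exact ((eD "readme".toList "txt".toList (by decide)).mp h).1
      · exact (ePP "readme".toList "txt".toList (by decide) h).1
      · exact ((eD "readme".toList "rst".toList (by decide)).mp h).1
      · exact (ePP "readme".toList "rst".toList (by decide) h).1
      · simp at h
    · intro h
      by_cases hRe : R = []
      · exact Or.inl (Or.inl ((eN _ (by decide)).mpr ⟨h, hRe⟩))
      · exact Or.inl (Or.inr ((eP _ (by decide)).mpr ⟨h, hRe⟩))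
  simp only [e0, eReadme, q1, q2, r1, r2, r3, r4, r5, r6]
  have dS : '.' ∉ S := hSdot
  have dR : R ≠ [] → R = '.' :: R.drop 1 := hRsh
  clear_value S R
  clear hL hS hR e0 eN eD eP ePP q1 q2 r1 r2 r3 r4 r5 r6 eReadme hSdot hRsh L
  by_cases hRe : R = []
  · subst hRe
    clear dR
    split_ifs <;> simp_all
  · obtain ⟨t, rfl⟩ : ∃ t, R = '.' :: t := ⟨_, dR hRe⟩
    clear dR hRe
    simp only [List.isEmpty_cons, List.drop_succ_cons, List.drop_zero, Bool.not_false, Bool.true_and, List.cons.injEq, true_and, ne_eq, reduceCtorEq,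
      not_false_eq_true, and_true]
    split_ifs <;> simp_all

-- ===== VERDICT (by name: the statement is the Claim_ definition above) =====
theorem should_remove_file_spec : Claim_equal_should_remove_file := by
  intro name _
  unfold Spec_should_remove_file
  exact pv_main name
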